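-- pv_equiv track=rewrite | github.com/ChristmasSun/TreeHacks2026 | src/render.py | normalize_mobject_accessors
-- ===== SOURCE A (Python) =====
-- def normalize_mobject_accessors(code: str) -> str:
--     """Replaces deprecated geometric helper calls with supported get_corner usage."""
--     replacements = {
--         ".get_bottom_left()": ".get_corner(DL)",
--         ".get_bottom_right()": ".get_corner(DR)",
--         ".get_top_left()": ".get_corner(UL)",
--         ".get_top_right()": ".get_corner(UR)",
--         ".get_center_point()": ".get_center()",
--     }
--     for old, new in replacements.items():
--         code = code.replace(old, new)
--     return code
-- ===== SOURCE B (Python) =====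
-- def normalize_mobject_accessors(code: str) -> str:
--     """Replaces deprecated geometric helper calls with supported get_corner usage."""
--     table = [
--         (".get_bottom_left()", ".get_corner(DL)"),
--         (".get_bottom_right()", ".get_corner(DR)"),
--         (".get_top_left()", ".get_corner(UL)"),
--         (".get_top_right()", ".get_corner(UR)"),
--         (".get_center_point()", ".get_center()"),
--     ]
--     out = []
--     i = 0
--     n = len(code)
--     while i < n:
--         for old, new in table:
--             if code.startswith(old, i):
--                 out.append(new)
--                 i += len(old)
--                 break
--         else:
--             out.append(code[i])
--             i += 1
--     return "".join(out)
-- ===== Notes on version B (the rewrite author's own statement) =====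
-- stated objective: alternative
-- what changed: Replaces A's five sequential full-string str.replace passes by a single left-to-right scan that consults a table of the five (old, new) substitutions at each position, emitting the replacement and jumping past the key on a match.
import Mathlib
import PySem

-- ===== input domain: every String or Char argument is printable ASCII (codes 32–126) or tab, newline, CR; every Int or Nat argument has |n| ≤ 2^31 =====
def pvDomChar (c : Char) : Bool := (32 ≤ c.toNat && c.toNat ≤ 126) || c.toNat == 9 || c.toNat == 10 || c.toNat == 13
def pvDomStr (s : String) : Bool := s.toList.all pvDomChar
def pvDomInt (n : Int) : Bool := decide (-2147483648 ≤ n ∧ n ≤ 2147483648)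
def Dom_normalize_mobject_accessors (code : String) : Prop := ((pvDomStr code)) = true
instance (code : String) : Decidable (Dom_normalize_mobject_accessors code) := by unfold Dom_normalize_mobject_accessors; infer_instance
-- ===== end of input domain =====

-- B replaces A's five sequential full-string str.replace passes by ONE left-to-right scan
-- with a table of the five substitutions (objective: alternative; return value only, no mutation).


-- ===== PORT A =====
-- five sequential str.replace passes, dict insertion order
def normalize_mobject_accessors (code : String) : String :=
  let code := PySem.Str.replace code ".get_bottom_left()" ".get_corner(DL)"
  let code := PySem.Str.replace code ".get_bottom_right()" ".get_corner(DR)"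
  let code := PySem.Str.replace code ".get_top_left()" ".get_corner(UL)"
  let code := PySem.Str.replace code ".get_top_right()" ".get_corner(UR)"
  let code := PySem.Str.replace code ".get_center_point()" ".get_center()"
  code

-- ===== PORT B =====
-- the table of B (old, new), as char lists
def pvK1 : List Char := ['.', 'g', 'e', 't', '_', 'b', 'o', 't', 't', 'o', 'm', '_', 'l', 'e', 'f', 't', '(', ')']  -- ".get_bottom_left()"
def pvR1 : List Char := ['.', 'g', 'e', 't', '_', 'c', 'o', 'r', 'n', 'e', 'r', '(', 'D', 'L', ')']  -- ".get_corner(DL)"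
def pvK2 : List Char := ['.', 'g', 'e', 't', '_', 'b', 'o', 't', 't', 'o', 'm', '_', 'r', 'i', 'g', 'h', 't', '(', ')']  -- ".get_bottom_right()"
def pvR2 : List Char := ['.', 'g', 'e', 't', '_', 'c', 'o', 'r', 'n', 'e', 'r', '(', 'D', 'R', ')']  -- ".get_corner(DR)"
def pvK3 : List Char := ['.', 'g', 'e', 't', '_', 't', 'o', 'p', '_', 'l', 'e', 'f', 't', '(', ')']  -- ".get_top_left()"
def pvR3 : List Char := ['.', 'g', 'e', 't', '_', 'c', 'o', 'r', 'n', 'e', 'r', '(', 'U', 'L', ')']  -- ".get_corner(UL)"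
def pvK4 : List Char := ['.', 'g', 'e', 't', '_', 't', 'o', 'p', '_', 'r', 'i', 'g', 'h', 't', '(', ')']  -- ".get_top_right()"
def pvR4 : List Char := ['.', 'g', 'e', 't', '_', 'c', 'o', 'r', 'n', 'e', 'r', '(', 'U', 'R', ')']  -- ".get_corner(UR)"
def pvK5 : List Char := ['.', 'g', 'e', 't', '_', 'c', 'e', 'n', 't', 'e', 'r', '_', 'p', 'o', 'i', 'n', 't', '(', ')']  -- ".get_center_point()"
def pvR5 : List Char := ['.', 'g', 'e', 't', '_', 'c', 'e', 'n', 't', 'e', 'r', '(', ')']  -- ".get_center()"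

-- B's single scan: at each position try the table entries in order; on a match emit the
-- replacement and jump past the key, otherwise emit the character and move on.
def pvScan (s : List Char) : List Char :=
  match s with
  | [] => []
  | c :: t =>
    if pvK1.isPrefixOf (c :: t) then pvR1 ++ pvScan ((c :: t).drop pvK1.length)
    else if pvK2.isPrefixOf (c :: t) then pvR2 ++ pvScan ((c :: t).drop pvK2.length)
    else if pvK3.isPrefixOf (c :: t) then pvR3 ++ pvScan ((c :: t).drop pvK3.length)
    else if pvK4.isPrefixOf (c :: t) then pvR4 ++ pvScan ((c :: t).drop pvK4.length)
    else if pvK5.isPrefixOf (c :: t) then pvR5 ++ pvScan ((c :: t).drop pvK5.length)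
    else c :: pvScan t
  termination_by s.length
  decreasing_by
    all_goals
      (have h : pvK1.length = 18 ∧ pvK2.length = 19 ∧ pvK3.length = 15 ∧ pvK4.length = 16 ∧ pvK5.length = 19 := by decide
       simp only [List.length_drop, List.length_cons]
       omega)

def normalize_mobject_accessors_alt (code : String) : String :=
  String.ofList (pvScan code.toList)

-- ===== PRECONDITION & SPEC =====
def Spec_normalize_mobject_accessors (code : String) (out : String) : Prop := out = normalize_mobject_accessors_alt code
instance (code : String) (out : String) : Decidable (Spec_normalize_mobject_accessors code out) := by unfold Spec_normalize_mobject_accessors; infer_instance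

-- ===== CLAIM (what is proved, stated in full; the proofs are below) =====
def Claim_equal_normalize_mobject_accessors : Prop := ∀ (code : String), Dom_normalize_mobject_accessors code → Spec_normalize_mobject_accessors code (normalize_mobject_accessors code)

-- ===== LEMMAS AND PROOFS =====

-- A single str.replace pass, written as the natural structural scan (proof-side model of
-- PySem.Chars.replace.go for a nonempty pattern).
def pvRepl (old new : List Char) (s : List Char) : List Char :=
  match s with
  | [] => []
  | c :: t =>
    if h : old ≠ [] ∧ old.isPrefixOf (c :: t) then new ++ pvRepl old new ((c :: t).drop old.length)
    else c :: pvRepl old new t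
  termination_by s.length
  decreasing_by
    · have := List.length_pos_iff.mpr h.1
      simp only [List.length_drop, List.length_cons]
      omega
    · simp

theorem pvRepl_nil (old new : List Char) : pvRepl old new [] = [] := by
  rw [pvRepl]

theorem pvGo_eq_pvRepl (old new : List Char) (hold : old ≠ []) :
    ∀ (fuel : Nat) (l acc : List Char), l.length ≤ fuel →
      PySem.Chars.replace.go old new fuel l acc = acc.reverse ++ pvRepl old new l := by
  intro fuel
  induction fuel with
  | zero =>
    intro l acc hl
    have : l = [] := List.length_eq_zero_iff.mp (Nat.le_zero.mp hl)
    subst this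
    simp [PySem.Chars.replace.go, pvRepl_nil]
  | succ n ih =>
    intro l acc hl
    cases l with
    | nil => simp [PySem.Chars.replace.go, pvRepl_nil]
    | cons c t =>
      rw [PySem.Chars.replace.go]
      by_cases hp : old.isPrefixOf (c :: t)
      · have hlen : ((c :: t).drop old.length).length ≤ n := by
          have := List.length_pos_iff.mpr hold
          simp only [List.length_drop, List.length_cons]
          simp only [List.length_cons] at hl
          omega
        rw [if_pos hp, ih _ _ hlen, pvRepl, dif_pos ⟨hold, hp⟩]
        simp
      · have hlt : t.length ≤ n := by simp only [List.length_cons] at hl; omega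
        rw [if_neg hp, ih _ _ hlt, pvRepl, dif_neg (by simp [hp])]
        simp

theorem pvReplace_eq_pvRepl (s old new : List Char) (hold : old ≠ []) :
    PySem.Chars.replace s old new = pvRepl old new s := by
  rw [PySem.Chars.replace, if_neg (by simp [List.isEmpty_iff, hold])]
  simpa using pvGo_eq_pvRepl old new hold s.length s [] le_rfl

-- k cannot match starting at any position strictly inside a (nor at its head), whatever follows a
def pvSep (k a : List Char) : Prop := ∀ t u, t <:+ a → t ≠ [] → ¬ k <+: (t ++ u)

theorem pvPrefix_append_cases {k a u : List Char} (h : k <+: a ++ u) : k <+: a ∨ a <+: k := by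
  rcases Nat.le_total k.length a.length with hl | hl
  · exact Or.inl ((List.isPrefix_append_of_length hl).mp h)
  · exact Or.inr (List.prefix_of_prefix_length_le (List.prefix_append a u) h hl)

theorem pvSep_of (k a : List Char) (h1 : ¬ k <+: a) (h2 : ¬ a <+: k)
    (hk : k.head? = some '.') (ha : '.' ∉ a.tail) : pvSep k a := by
  intro t u ht htne hpre
  cases a with
  | nil => exact htne (List.suffix_nil.mp ht)
  | cons b a' =>
    rcases List.suffix_cons_iff.mp ht with rfl | ht'
    · rcases pvPrefix_append_cases hpre with h | h
      · exact h1 h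
      · exact h2 h
    · cases t with
      | nil => exact htne rfl
      | cons d t' =>
        cases k with
        | nil => simp at hk
        | cons kc k' =>
          have hkc : kc = '.' := by simpa using hk
          have hd : d = kc := (List.cons_prefix_cons.mp hpre).1.symm
          have hmem : d ∈ a' := ht'.subset (List.mem_cons_self)
          exact ha ((hd.trans hkc) ▸ hmem)

theorem pvRepl_append (k r : List Char) (_hk : k ≠ []) :
    ∀ (a u : List Char), pvSep k a → pvRepl k r (a ++ u) = a ++ pvRepl k r u := by
  intro a
  induction a with
  | nil => intro u _; simp
  | cons c a' ih =>
    intro u hsep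
    have hnp : ¬ k <+: (c :: a') ++ u := hsep (c :: a') u (List.suffix_refl _) (by simp)
    rw [List.cons_append, pvRepl, dif_neg (by
      rintro ⟨-, hp⟩
      exact hnp (by simpa using List.isPrefixOf_iff_prefix.mp hp))]
    have hsep' : pvSep k a' := by
      intro t u' ht htne
      exact hsep t u' (ht.trans (List.suffix_cons c a')) htne
    rw [ih u hsep', List.cons_append]

theorem pvRepl_cons_self (k r u : List Char) (hk : k ≠ []) :
    pvRepl k r (k ++ u) = r ++ pvRepl k r u := by
  cases k with
  | nil => exact absurd rfl hk
  | cons c k' =>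
    rw [List.cons_append, pvRepl, dif_pos ⟨hk, List.isPrefixOf_iff_prefix.mpr (by
      rw [← List.cons_append]; exact List.prefix_append (c :: k') u)⟩]
    rw [← List.cons_append, List.drop_left]

theorem pvRepl_cons_of_not_prefix (k r : List Char) (c : Char) (t : List Char)
    (h : ¬ k <+: c :: t) : pvRepl k r (c :: t) = c :: pvRepl k r t := by
  rw [pvRepl, dif_neg (by rintro ⟨-, hp⟩; exact h (List.isPrefixOf_iff_prefix.mp hp))]

-- no dotless pattern gains a new occurrence at the head through a replace pass
theorem pvRepl_prefix_dotless (kI rI : List Char) (hrI : rI.head? = some '.') :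
    ∀ (n : Nat) (s q : List Char), s.length ≤ n → '.' ∉ q →
      q <+: pvRepl kI rI s → q <+: s := by
  intro n
  induction n with
  | zero =>
    intro s q hl _ hq
    have : s = [] := List.length_eq_zero_iff.mp (Nat.le_zero.mp hl)
    subst this
    rw [pvRepl_nil] at hq
    exact hq
  | succ n ih =>
    intro s q hl hdot hq
    cases s with
    | nil => rw [pvRepl_nil] at hq; exact hq
    | cons c t =>
      by_cases hp : kI ≠ [] ∧ kI.isPrefixOf (c :: t)
      · rw [pvRepl, dif_pos hp] at hq
        cases q with
        | nil => exact List.nil_prefix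
        | cons qc q' =>
          cases rI with
          | nil => simp at hrI
          | cons rc rI' =>
            have : qc = rc := (List.cons_prefix_cons.mp (by simpa using hq)).1
            have hrc : rc = '.' := by simpa using hrI
            exact absurd (by rw [this, hrc]; exact List.mem_cons_self) hdot
      · rw [pvRepl, dif_neg hp] at hq
        cases q with
        | nil => exact List.nil_prefix
        | cons qc q' =>
          obtain ⟨rfl, hq'⟩ := List.cons_prefix_cons.mp hq
          have hlt : t.length ≤ n := by simp only [List.length_cons] at hl; omega
          have hdot' : '.' ∉ q' := fun h => hdot (List.mem_cons_of_mem _ h)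
          exact List.cons_prefix_cons.mpr ⟨rfl, ih t q' hlt hdot' hq'⟩

-- a key that did not match at the head still does not match there after a replace pass
theorem pvNoNewHead (kI rI k : List Char) (hrI : rI.head? = some '.')
    (hk : k.head? = some '.') (hkd : '.' ∉ k.tail)
    (h1 : ¬ k <+: rI) (h2 : ¬ rI <+: k) :
    ∀ (s : List Char), ¬ k <+: s → ¬ k <+: pvRepl kI rI s := by
  intro s hns hq
  cases s with
  | nil => rw [pvRepl_nil] at hq; exact hns (hq.trans List.nil_prefix)
  | cons c t =>
    by_cases hp : kI ≠ [] ∧ kI.isPrefixOf (c :: t)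
    · rw [pvRepl, dif_pos hp] at hq
      rcases pvPrefix_append_cases hq with h | h
      · exact h1 h
      · exact h2 h
    · rw [pvRepl, dif_neg hp] at hq
      cases k with
      | nil => simp at hk
      | cons kc k' =>
        obtain ⟨rfl, hq'⟩ := List.cons_prefix_cons.mp hq
        have : k' <+: t :=
          pvRepl_prefix_dotless kI rI hrI t.length t k' le_rfl (by simpa using hkd) hq'
        exact hns (List.cons_prefix_cons.mpr ⟨rfl, this⟩)

-- instances of the separation / head-preservation facts for the concrete table entries
set_option maxRecDepth 4000 in
theorem pvSepK1K2 : pvSep pvK1 pvK2 := pvSep_of _ _ (by decide) (by decide) (by decide) (by decide)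
set_option maxRecDepth 4000 in
theorem pvSepK1K3 : pvSep pvK1 pvK3 := pvSep_of _ _ (by decide) (by decide) (by decide) (by decide)
set_option maxRecDepth 4000 in
theorem pvSepK1K4 : pvSep pvK1 pvK4 := pvSep_of _ _ (by decide) (by decide) (by decide) (by decide)
set_option maxRecDepth 4000 in
theorem pvSepK1K5 : pvSep pvK1 pvK5 := pvSep_of _ _ (by decide) (by decide) (by decide) (by decide)
set_option maxRecDepth 4000 in
theorem pvSepK2K3 : pvSep pvK2 pvK3 := pvSep_of _ _ (by decide) (by decide) (by decide) (by decide)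
set_option maxRecDepth 4000 in
theorem pvSepK2K4 : pvSep pvK2 pvK4 := pvSep_of _ _ (by decide) (by decide) (by decide) (by decide)
set_option maxRecDepth 4000 in
theorem pvSepK2K5 : pvSep pvK2 pvK5 := pvSep_of _ _ (by decide) (by decide) (by decide) (by decide)
set_option maxRecDepth 4000 in
theorem pvSepK3K4 : pvSep pvK3 pvK4 := pvSep_of _ _ (by decide) (by decide) (by decide) (by decide)
set_option maxRecDepth 4000 in
theorem pvSepK3K5 : pvSep pvK3 pvK5 := pvSep_of _ _ (by decide) (by decide) (by decide) (by decide)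
set_option maxRecDepth 4000 in
theorem pvSepK4K5 : pvSep pvK4 pvK5 := pvSep_of _ _ (by decide) (by decide) (by decide) (by decide)
set_option maxRecDepth 4000 in
theorem pvSepK2R1 : pvSep pvK2 pvR1 := pvSep_of _ _ (by decide) (by decide) (by decide) (by decide)
set_option maxRecDepth 4000 in
theorem pvSepK3R1 : pvSep pvK3 pvR1 := pvSep_of _ _ (by decide) (by decide) (by decide) (by decide)
set_option maxRecDepth 4000 in
theorem pvSepK3R2 : pvSep pvK3 pvR2 := pvSep_of _ _ (by decide) (by decide) (by decide) (by decide)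
set_option maxRecDepth 4000 in
theorem pvSepK4R1 : pvSep pvK4 pvR1 := pvSep_of _ _ (by decide) (by decide) (by decide) (by decide)
set_option maxRecDepth 4000 in
theorem pvSepK4R2 : pvSep pvK4 pvR2 := pvSep_of _ _ (by decide) (by decide) (by decide) (by decide)
set_option maxRecDepth 4000 in
theorem pvSepK4R3 : pvSep pvK4 pvR3 := pvSep_of _ _ (by decide) (by decide) (by decide) (by decide)
set_option maxRecDepth 4000 in
theorem pvSepK5R1 : pvSep pvK5 pvR1 := pvSep_of _ _ (by decide) (by decide) (by decide) (by decide)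
set_option maxRecDepth 4000 in
theorem pvSepK5R2 : pvSep pvK5 pvR2 := pvSep_of _ _ (by decide) (by decide) (by decide) (by decide)
set_option maxRecDepth 4000 in
theorem pvSepK5R3 : pvSep pvK5 pvR3 := pvSep_of _ _ (by decide) (by decide) (by decide) (by decide)
set_option maxRecDepth 4000 in
theorem pvSepK5R4 : pvSep pvK5 pvR4 := pvSep_of _ _ (by decide) (by decide) (by decide) (by decide)
set_option maxRecDepth 4000 in
theorem pvNNH12 : ∀ s, ¬ pvK2 <+: s → ¬ pvK2 <+: pvRepl pvK1 pvR1 s :=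
  pvNoNewHead pvK1 pvR1 pvK2 (by decide) (by decide) (by decide) (by decide) (by decide)
set_option maxRecDepth 4000 in
theorem pvNNH13 : ∀ s, ¬ pvK3 <+: s → ¬ pvK3 <+: pvRepl pvK1 pvR1 s :=
  pvNoNewHead pvK1 pvR1 pvK3 (by decide) (by decide) (by decide) (by decide) (by decide)
set_option maxRecDepth 4000 in
theorem pvNNH14 : ∀ s, ¬ pvK4 <+: s → ¬ pvK4 <+: pvRepl pvK1 pvR1 s :=
  pvNoNewHead pvK1 pvR1 pvK4 (by decide) (by decide) (by decide) (by decide) (by decide)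
set_option maxRecDepth 4000 in
theorem pvNNH15 : ∀ s, ¬ pvK5 <+: s → ¬ pvK5 <+: pvRepl pvK1 pvR1 s :=
  pvNoNewHead pvK1 pvR1 pvK5 (by decide) (by decide) (by decide) (by decide) (by decide)
set_option maxRecDepth 4000 in
theorem pvNNH23 : ∀ s, ¬ pvK3 <+: s → ¬ pvK3 <+: pvRepl pvK2 pvR2 s :=
  pvNoNewHead pvK2 pvR2 pvK3 (by decide) (by decide) (by decide) (by decide) (by decide)
set_option maxRecDepth 4000 in
theorem pvNNH24 : ∀ s, ¬ pvK4 <+: s → ¬ pvK4 <+: pvRepl pvK2 pvR2 s :=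
  pvNoNewHead pvK2 pvR2 pvK4 (by decide) (by decide) (by decide) (by decide) (by decide)
set_option maxRecDepth 4000 in
theorem pvNNH25 : ∀ s, ¬ pvK5 <+: s → ¬ pvK5 <+: pvRepl pvK2 pvR2 s :=
  pvNoNewHead pvK2 pvR2 pvK5 (by decide) (by decide) (by decide) (by decide) (by decide)
set_option maxRecDepth 4000 in
theorem pvNNH34 : ∀ s, ¬ pvK4 <+: s → ¬ pvK4 <+: pvRepl pvK3 pvR3 s :=
  pvNoNewHead pvK3 pvR3 pvK4 (by decide) (by decide) (by decide) (by decide) (by decide)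
set_option maxRecDepth 4000 in
theorem pvNNH35 : ∀ s, ¬ pvK5 <+: s → ¬ pvK5 <+: pvRepl pvK3 pvR3 s :=
  pvNoNewHead pvK3 pvR3 pvK5 (by decide) (by decide) (by decide) (by decide) (by decide)
set_option maxRecDepth 4000 in
theorem pvNNH45 : ∀ s, ¬ pvK5 <+: s → ¬ pvK5 <+: pvRepl pvK4 pvR4 s :=
  pvNoNewHead pvK4 pvR4 pvK5 (by decide) (by decide) (by decide) (by decide) (by decide)

-- the composite of A's five passes, on char lists
def pvChain (s : List Char) : List Char :=
  pvRepl pvK5 pvR5 (pvRepl pvK4 pvR4 (pvRepl pvK3 pvR3 (pvRepl pvK2 pvR2 (pvRepl pvK1 pvR1 s))))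

theorem pvScan_cons (c : Char) (t : List Char) :
    pvScan (c :: t) =
      if pvK1.isPrefixOf (c :: t) then pvR1 ++ pvScan ((c :: t).drop pvK1.length)
      else if pvK2.isPrefixOf (c :: t) then pvR2 ++ pvScan ((c :: t).drop pvK2.length)
      else if pvK3.isPrefixOf (c :: t) then pvR3 ++ pvScan ((c :: t).drop pvK3.length)
      else if pvK4.isPrefixOf (c :: t) then pvR4 ++ pvScan ((c :: t).drop pvK4.length)
      else if pvK5.isPrefixOf (c :: t) then pvR5 ++ pvScan ((c :: t).drop pvK5.length)
      else c :: pvScan t := by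
  rw [pvScan]

theorem pvScan_nil : pvScan [] = [] := by rw [pvScan]

set_option maxRecDepth 4000 in
theorem pvMain : ∀ (n : Nat) (s : List Char), s.length ≤ n → pvChain s = pvScan s := by
  intro n
  induction n with
  | zero =>
    intro s hl
    have : s = [] := List.length_eq_zero_iff.mp (Nat.le_zero.mp hl)
    subst this
    simp [pvChain, pvRepl_nil, pvScan_nil]
  | succ n ih =>
    intro s hl
    cases s with
    | nil => simp [pvChain, pvRepl_nil, pvScan_nil]
    | cons c t0 =>
      simp only [List.length_cons] at hl
      by_cases hp1 : pvK1 <+: c :: t0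
      · obtain ⟨u, hu⟩ := hp1
        have hul : u.length ≤ n := by
          have := congrArg List.length hu
          simp only [List.length_append, List.length_cons] at this
          have h18 : pvK1.length = 18 := by decide
          omega
        rw [pvScan_cons, if_pos (List.isPrefixOf_iff_prefix.mpr ⟨u, hu⟩), ← hu,
           List.drop_left]
        show pvChain (pvK1 ++ u) = pvR1 ++ pvScan u
        rw [pvChain, pvRepl_cons_self pvK1 pvR1 u (by decide),
            pvRepl_append pvK2 pvR2 (by decide) pvR1 _ pvSepK2R1,
            pvRepl_append pvK3 pvR3 (by decide) pvR1 _ pvSepK3R1,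
            pvRepl_append pvK4 pvR4 (by decide) pvR1 _ pvSepK4R1,
            pvRepl_append pvK5 pvR5 (by decide) pvR1 _ pvSepK5R1]
        exact congrArg (pvR1 ++ ·) (ih u hul)
      · by_cases hp2 : pvK2 <+: c :: t0
        · obtain ⟨u, hu⟩ := hp2
          have hul : u.length ≤ n := by
            have := congrArg List.length hu
            simp only [List.length_append, List.length_cons] at this
            have h19 : pvK2.length = 19 := by decide
            omega
          rw [pvScan_cons,
              if_neg (by rw [List.isPrefixOf_iff_prefix]; exact hp1),
              if_pos (List.isPrefixOf_iff_prefix.mpr ⟨u, hu⟩), ← hu, List.drop_left]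
          show pvChain (pvK2 ++ u) = pvR2 ++ pvScan u
          rw [pvChain,
              pvRepl_append pvK1 pvR1 (by decide) pvK2 _ pvSepK1K2,
              pvRepl_cons_self pvK2 pvR2 _ (by decide),
              pvRepl_append pvK3 pvR3 (by decide) pvR2 _ pvSepK3R2,
              pvRepl_append pvK4 pvR4 (by decide) pvR2 _ pvSepK4R2,
              pvRepl_append pvK5 pvR5 (by decide) pvR2 _ pvSepK5R2]
          exact congrArg (pvR2 ++ ·) (ih u hul)
        · by_cases hp3 : pvK3 <+: c :: t0
          · obtain ⟨u, hu⟩ := hp3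
            have hul : u.length ≤ n := by
              have := congrArg List.length hu
              simp only [List.length_append, List.length_cons] at this
              have h15 : pvK3.length = 15 := by decide
              omega
            rw [pvScan_cons,
                if_neg (by rw [List.isPrefixOf_iff_prefix]; exact hp1),
                if_neg (by rw [List.isPrefixOf_iff_prefix]; exact hp2),
                if_pos (List.isPrefixOf_iff_prefix.mpr ⟨u, hu⟩), ← hu, List.drop_left]
            show pvChain (pvK3 ++ u) = pvR3 ++ pvScan u
            rw [pvChain,
                pvRepl_append pvK1 pvR1 (by decide) pvK3 _ pvSepK1K3,
                pvRepl_append pvK2 pvR2 (by decide) pvK3 _ pvSepK2K3,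
                pvRepl_cons_self pvK3 pvR3 _ (by decide),
                pvRepl_append pvK4 pvR4 (by decide) pvR3 _ pvSepK4R3,
                pvRepl_append pvK5 pvR5 (by decide) pvR3 _ pvSepK5R3]
            exact congrArg (pvR3 ++ ·) (ih u hul)
          · by_cases hp4 : pvK4 <+: c :: t0
            · obtain ⟨u, hu⟩ := hp4
              have hul : u.length ≤ n := by
                have := congrArg List.length hu
                simp only [List.length_append, List.length_cons] at this
                have h16 : pvK4.length = 16 := by decide
                omega
              rw [pvScan_cons,
                  if_neg (by rw [List.isPrefixOf_iff_prefix]; exact hp1),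
                  if_neg (by rw [List.isPrefixOf_iff_prefix]; exact hp2),
                  if_neg (by rw [List.isPrefixOf_iff_prefix]; exact hp3),
                  if_pos (List.isPrefixOf_iff_prefix.mpr ⟨u, hu⟩), ← hu, List.drop_left]
              show pvChain (pvK4 ++ u) = pvR4 ++ pvScan u
              rw [pvChain,
                  pvRepl_append pvK1 pvR1 (by decide) pvK4 _ pvSepK1K4,
                  pvRepl_append pvK2 pvR2 (by decide) pvK4 _ pvSepK2K4,
                  pvRepl_append pvK3 pvR3 (by decide) pvK4 _ pvSepK3K4,
                  pvRepl_cons_self pvK4 pvR4 _ (by decide),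
                  pvRepl_append pvK5 pvR5 (by decide) pvR4 _ pvSepK5R4]
              exact congrArg (pvR4 ++ ·) (ih u hul)
            · by_cases hp5 : pvK5 <+: c :: t0
              · obtain ⟨u, hu⟩ := hp5
                have hul : u.length ≤ n := by
                  have := congrArg List.length hu
                  simp only [List.length_append, List.length_cons] at this
                  have h19 : pvK5.length = 19 := by decide
                  omega
                rw [pvScan_cons,
                    if_neg (by rw [List.isPrefixOf_iff_prefix]; exact hp1),
                    if_neg (by rw [List.isPrefixOf_iff_prefix]; exact hp2),
                    if_neg (by rw [List.isPrefixOf_iff_prefix]; exact hp3),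
                    if_neg (by rw [List.isPrefixOf_iff_prefix]; exact hp4),
                    if_pos (List.isPrefixOf_iff_prefix.mpr ⟨u, hu⟩), ← hu, List.drop_left]
                show pvChain (pvK5 ++ u) = pvR5 ++ pvScan u
                rw [pvChain,
                    pvRepl_append pvK1 pvR1 (by decide) pvK5 _ pvSepK1K5,
                    pvRepl_append pvK2 pvR2 (by decide) pvK5 _ pvSepK2K5,
                    pvRepl_append pvK3 pvR3 (by decide) pvK5 _ pvSepK3K5,
                    pvRepl_append pvK4 pvR4 (by decide) pvK5 _ pvSepK4K5,
                    pvRepl_cons_self pvK5 pvR5 _ (by decide)]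
                exact congrArg (pvR5 ++ ·) (ih u hul)
              · -- no key matches at this position: every pass keeps the head character
                have e1 : pvRepl pvK1 pvR1 (c :: t0) = c :: pvRepl pvK1 pvR1 t0 :=
                  pvRepl_cons_of_not_prefix _ _ _ _ hp1
                have n2 : ¬ pvK2 <+: pvRepl pvK1 pvR1 (c :: t0) :=
                  pvNNH12 _ hp2
                rw [e1] at n2
                have e2 : pvRepl pvK2 pvR2 (c :: pvRepl pvK1 pvR1 t0)
                    = c :: pvRepl pvK2 pvR2 (pvRepl pvK1 pvR1 t0) :=
                  pvRepl_cons_of_not_prefix _ _ _ _ n2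
                have n3 : ¬ pvK3 <+: pvRepl pvK2 pvR2 (pvRepl pvK1 pvR1 (c :: t0)) :=
                  pvNNH23 _
                    (pvNNH13 _ hp3)
                rw [e1, e2] at n3
                have e3 : pvRepl pvK3 pvR3 (c :: pvRepl pvK2 pvR2 (pvRepl pvK1 pvR1 t0))
                    = c :: pvRepl pvK3 pvR3 (pvRepl pvK2 pvR2 (pvRepl pvK1 pvR1 t0)) :=
                  pvRepl_cons_of_not_prefix _ _ _ _ n3
                have n4 : ¬ pvK4 <+: pvRepl pvK3 pvR3 (pvRepl pvK2 pvR2 (pvRepl pvK1 pvR1 (c :: t0))) :=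
                  pvNNH34 _
                    (pvNNH24 _
                      (pvNNH14 _ hp4))
                rw [e1, e2, e3] at n4
                have e4 : pvRepl pvK4 pvR4 (c :: pvRepl pvK3 pvR3 (pvRepl pvK2 pvR2 (pvRepl pvK1 pvR1 t0)))
                    = c :: pvRepl pvK4 pvR4 (pvRepl pvK3 pvR3 (pvRepl pvK2 pvR2 (pvRepl pvK1 pvR1 t0))) :=
                  pvRepl_cons_of_not_prefix _ _ _ _ n4
                have n5 : ¬ pvK5 <+: pvRepl pvK4 pvR4 (pvRepl pvK3 pvR3 (pvRepl pvK2 pvR2 (pvRepl pvK1 pvR1 (c :: t0)))) :=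
                  pvNNH45 _
                    (pvNNH35 _
                      (pvNNH25 _
                        (pvNNH15 _ hp5)))
                rw [e1, e2, e3] at n5
                rw [pvChain, e1, e2, e3, e4]
                have e5' := pvRepl_cons_of_not_prefix pvK5 pvR5 c
                  (pvRepl pvK4 pvR4 (pvRepl pvK3 pvR3 (pvRepl pvK2 pvR2 (pvRepl pvK1 pvR1 t0))))
                  (by rw [← e4]; exact n5)
                rw [e5',
                    pvScan_cons,
                    if_neg (by rw [List.isPrefixOf_iff_prefix]; exact hp1),
                    if_neg (by rw [List.isPrefixOf_iff_prefix]; exact hp2),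
                    if_neg (by rw [List.isPrefixOf_iff_prefix]; exact hp3),
                    if_neg (by rw [List.isPrefixOf_iff_prefix]; exact hp4),
                    if_neg (by rw [List.isPrefixOf_iff_prefix]; exact hp5)]
                exact congrArg (c :: ·) (ih t0 (by omega))

-- ===== VERDICT (by name: the statement is the Claim_ definition above) =====
set_option maxRecDepth 4000 in
theorem normalize_mobject_accessors_spec : Claim_equal_normalize_mobject_accessors := by
  intro code _
  unfold Spec_normalize_mobject_accessors normalize_mobject_accessors normalize_mobject_accessors_alt
  simp only [PySem.Str.replace, String.toList_ofList]
  rw [pvReplace_eq_pvRepl _ _ _ (by decide), pvReplace_eq_pvRepl _ _ _ (by decide),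
      pvReplace_eq_pvRepl _ _ _ (by decide), pvReplace_eq_pvRepl _ _ _ (by decide),
      pvReplace_eq_pvRepl _ _ _ (by decide)]
  have hk1 : ".get_bottom_left()".toList = pvK1 := by decide
  have hr1 : ".get_corner(DL)".toList = pvR1 := by decide
  have hk2 : ".get_bottom_right()".toList = pvK2 := by decide
  have hr2 : ".get_corner(DR)".toList = pvR2 := by decide
  have hk3 : ".get_top_left()".toList = pvK3 := by decide
  have hr3 : ".get_corner(UL)".toList = pvR3 := by decide
  have hk4 : ".get_top_right()".toList = pvK4 := by decide
  have hr4 : ".get_corner(UR)".toList = pvR4 := by decide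
  have hk5 : ".get_center_point()".toList = pvK5 := by decide
  have hr5 : ".get_center()".toList = pvR5 := by decide
  rw [hk1, hr1, hk2, hr2, hk3, hr3, hk4, hr4, hk5, hr5]
  exact congrArg String.ofList (pvMain code.toList.length code.toList le_rfl)
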